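-- pv_equiv track=rewrite | github.com/ChristosWhatling/clocktowerAlmanacizationator | main.py | boldFullyCapitalisedWords
-- ===== SOURCE A (Python) =====
-- def boldFullyCapitalisedWords(input):
--     words = input.split(" ")
--     output, trailingComma, boldOpen = "", "", False
--     for word in words:
--         if word[-1:] == ",":
--             trailingComma = word[-1:]
--             tempWord = word[:-1]
--         else:
--             trailingComma = ""
--             tempWord = word
--
--         if isUpperOrDecimal(tempWord) and not boldOpen:
--             output += "\\textbf{" + tempWord + trailingComma + " "
--             boldOpen = True
--         elif isUpperOrDecimal(tempWord):
--             output += tempWord + trailingComma + " "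
--         elif boldOpen:
--             output += "}" + tempWord + trailingComma + " "
--             boldOpen = False
--         else:
--             output += tempWord + trailingComma + " "
--     if boldOpen:
--         output += "}"
--     return output.replace(", }", "}, ").replace(" }", "} ")
--
-- def isUpperOrDecimal(input):
--     return input.isupper() or input.isdecimal()
-- ===== SOURCE B (Python) =====
-- def isUpperOrDecimal(input):
--     return input.isupper() or input.isdecimal()
--
-- def boldFullyCapitalisedWords(input):
--     words = input.split(" ")
--     flagged = [(w, isUpperOrDecimal(w[:-1] if w[-1:] == "," else w)) for w in words]
--     pieces = []
--     rest = flagged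
--     while rest:
--         q = rest[0][1]
--         k = 1
--         while k < len(rest) and rest[k][1] == q:
--             k += 1
--         grp, rest = rest[:k], rest[k:]
--         chunk = "".join(w + " " for w, _ in grp)
--         pieces.append("\\textbf{" + chunk + "}" if q else chunk)
--     return "".join(pieces).replace(", }", "}, ").replace(" }", "} ")
-- ===== Notes on version B (the rewrite author's own statement) =====
-- stated objective: simpler
-- what changed: Replaced A's stateful boldOpen-flag loop (open/close braces decided one word at a time) by a two-pass decomposition: compute each token's qualifies-flag once, then peel off maximal runs of equal-flag tokens and wrap each qualifying run in \textbf{...} as a whole.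
import Mathlib
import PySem

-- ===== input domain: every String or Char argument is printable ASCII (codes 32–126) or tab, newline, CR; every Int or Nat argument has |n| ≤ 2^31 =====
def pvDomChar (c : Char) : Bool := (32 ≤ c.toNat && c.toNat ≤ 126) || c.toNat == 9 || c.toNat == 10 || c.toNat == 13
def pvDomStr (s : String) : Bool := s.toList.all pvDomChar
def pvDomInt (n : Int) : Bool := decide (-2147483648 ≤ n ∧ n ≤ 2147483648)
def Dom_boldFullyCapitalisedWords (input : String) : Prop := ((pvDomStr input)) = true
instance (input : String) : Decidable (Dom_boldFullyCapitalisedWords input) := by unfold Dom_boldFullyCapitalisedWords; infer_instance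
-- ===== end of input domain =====

-- B replaces A's stateful boldOpen-flag loop by a two-pass grouping of consecutive
-- qualifying tokens (objective: simpler decomposition; same cost).

-- shared helper (isUpperOrDecimal from the same Python module, used by both programs);
-- str.isupper / str.isdecimal are hand-ported here (PySem has only the char predicates):
-- on the ASCII domain, s.isupper() = (some cased char) and (no lowercase char),
-- s.isdecimal() = nonempty and all chars '0'-'9'; exact on Dom (printable ASCII + tab/newline/CR).
def pvIsUpperOrDecimal (s : String) : Bool :=
  (s.toList.any (fun c => PySem.Str.isalpha c) && s.toList.all (fun c => !PySem.Str.islower c))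
  || (!s.toList.isEmpty && s.toList.all (fun c => PySem.Str.isdigit c))

-- ===== PORT A =====
-- the for-loop of A over words, state (output, boldOpen)
def pvLoopA : List String → String → Bool → String
  | [], output, boldOpen => if boldOpen then output ++ "}" else output
  | word :: ws, output, boldOpen =>
    let lastc := PySem.Str.slice word (some (-1)) none      -- word[-1:]
    let tc := if lastc == "," then (lastc, PySem.Str.slice word none (some (-1)))
              else ("", word)                               -- (trailingComma, tempWord)
    if pvIsUpperOrDecimal tc.2 && !boldOpen then
      pvLoopA ws (output ++ "\\textbf{" ++ tc.2 ++ tc.1 ++ " ") true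
    else if pvIsUpperOrDecimal tc.2 then
      pvLoopA ws (output ++ tc.2 ++ tc.1 ++ " ") boldOpen
    else if boldOpen then
      pvLoopA ws (output ++ "}" ++ tc.2 ++ tc.1 ++ " ") false
    else
      pvLoopA ws (output ++ tc.2 ++ tc.1 ++ " ") boldOpen

def boldFullyCapitalisedWords (input : String) : String :=
  let words := (PySem.Str.split? input " ").getD []   -- sep is the nonempty literal " ", so never none
  let output := pvLoopA words "" false
  PySem.Str.replace (PySem.Str.replace output ", }" "}, ") " }" "} "

-- ===== PORT B =====
-- B's flag for one token: strip a single trailing comma, then isUpperOrDecimal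
def pvFlagB (w : String) : Bool :=
  pvIsUpperOrDecimal (if PySem.Str.slice w (some (-1)) none == ","
                      then PySem.Str.slice w none (some (-1)) else w)

-- B's outer while loop: peel off one maximal group of equal-flag tokens per step
def pvBuildB : List (String × Bool) → String
  | [] => ""
  | (w, q) :: rest =>
    let grp := (w, q) :: rest.takeWhile (fun p => p.2 == q)
    let rest' := rest.dropWhile (fun p => p.2 == q)
    let chunk := PySem.Str.join "" (grp.map (fun p => p.1 ++ " "))
    (if q then "\\textbf{" ++ chunk ++ "}" else chunk) ++ pvBuildB rest'
  termination_by l => l.length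
  decreasing_by
    exact Nat.lt_succ_of_le (List.length_dropWhile_le _ _)

def boldFullyCapitalisedWords_alt (input : String) : String :=
  let words := (PySem.Str.split? input " ").getD []   -- sep is the nonempty literal " ", so never none
  let flagged := words.map (fun w => (w, pvFlagB w))
  let out := pvBuildB flagged
  PySem.Str.replace (PySem.Str.replace out ", }" "}, ") " }" "} "

-- ===== PRECONDITION & SPEC =====
def Spec_boldFullyCapitalisedWords (input : String) (out : String) : Prop := out = boldFullyCapitalisedWords_alt input
instance (input : String) (out : String) : Decidable (Spec_boldFullyCapitalisedWords input out) := by unfold Spec_boldFullyCapitalisedWords; infer_instance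

-- ===== CLAIM (what is proved, stated in full; the proofs are below) =====
def Claim_equal_boldFullyCapitalisedWords : Prop := ∀ (input : String), Dom_boldFullyCapitalisedWords input → Spec_boldFullyCapitalisedWords input (boldFullyCapitalisedWords input)

-- ===== LEMMAS AND PROOFS =====

-- the common "pre-replace" string, word by word, as a List Char spec:
-- pvSimpleB = outside a bold run, pvSimpleCont = inside an open "\textbf{"
mutual
def pvSimpleB : List (String × Bool) → List Char
  | [] => []
  | (w, q) :: rest =>
    if q then "\\textbf{".toList ++ w.toList ++ [' '] ++ pvSimpleCont rest
    else w.toList ++ [' '] ++ pvSimpleB rest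
def pvSimpleCont : List (String × Bool) → List Char
  | [] => ['}']
  | (w, q) :: rest =>
    if q then w.toList ++ [' '] ++ pvSimpleCont rest
    else '}' :: (w.toList ++ [' '] ++ pvSimpleB rest)
end

-- slicing w[-1:] is the last-character suffix
theorem pvSlice_from_neg_one (cs : List Char) :
    PySem.List.slice cs (some (-1)) none = cs.drop (cs.length - 1) := by
  simp [PySem.List.slice]

-- A's loop computes the word-by-word spec
set_option maxRecDepth 8192 in
theorem pvLoopA_eq (ws : List String) : ∀ (out : String) (b : Bool),
    (pvLoopA ws out b).toList
      = out.toList ++ (if b then pvSimpleCont (ws.map (fun w => (w, pvFlagB w)))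
                       else pvSimpleB (ws.map (fun w => (w, pvFlagB w)))) := by
  induction ws with
  | nil =>
    intro out b
    cases b <;> simp [pvLoopA, pvSimpleB, pvSimpleCont]
  | cons word ws ih =>
    intro out b
    show (pvLoopA (word :: ws) out b).toList = _
    rw [pvLoopA]
    simp only [pvFlagB] at *
    by_cases hc : PySem.Str.slice word (some (-1)) none == ","
    · have hc' : PySem.Str.slice word (some (-1)) none = "," := beq_iff_eq.mp hc
      have hsl : PySem.List.slice word.toList none (some (-1)) = word.toList.dropLast := by
        have h := PySem.Str.slice_to_neg_one word
        simpa using h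
      have h3 : PySem.List.slice word.toList (some (-1)) none = [','] := by
        have h := congrArg String.toList hc'
        simpa using h
      have h1 : word.toList.dropLast ++ [','] = word.toList := by
        rw [List.dropLast_eq_take, ← h3, pvSlice_from_neg_one, List.take_append_drop]
      have hw2 : ∀ l : List Char,
          PySem.List.slice word.toList none (some (-1)) ++ ',' :: l = word.toList ++ l := by
        intro l
        rw [hsl, ← h1]
        simp
      have hw2s : ∀ l : List Char,
          (PySem.Str.slice word none (some (-1))).toList ++ ',' :: l = word.toList ++ l := by
        intro l
        rw [← hw2 l]
        simp
      simp only [hc, if_true]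
      by_cases hq : pvIsUpperOrDecimal (PySem.Str.slice word none (some (-1))) = true
      · cases b <;>
          simp [hq, ih, pvSimpleB, pvSimpleCont, hc', String.toList_append, hw2, hw2s,
            String.append_assoc]
      · simp only [Bool.not_eq_true] at hq
        cases b <;>
          simp [hq, ih, pvSimpleB, pvSimpleCont, hc', String.toList_append, hw2, hw2s,
            String.append_assoc]
    · simp only [Bool.not_eq_true] at hc
      have hc' : ¬ PySem.Str.slice word (some (-1)) none = "," := by simpa using hc
      simp only [hc]
      by_cases hq : pvIsUpperOrDecimal word = true
      · cases b <;>
          simp [hq, ih, pvSimpleB, pvSimpleCont, hc', String.append_assoc]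
      · simp only [Bool.not_eq_true] at hq
        cases b <;>
          simp [hq, ih, pvSimpleB, pvSimpleCont, hc', String.append_assoc]

-- "".join at the character level
theorem pvJoinEmpty (x : List Char) (xs : List (List Char)) :
    PySem.Chars.join [] (x :: xs) = x ++ PySem.Chars.join [] xs := by
  cases xs <;> simp [PySem.Chars.join, List.intercalate, List.intersperse]

theorem pvChunkToList (grp : List (String × Bool)) :
    (PySem.Str.join "" (grp.map (fun p => p.1 ++ " "))).toList
      = (grp.map (fun p => p.1.toList ++ [' '])).flatten := by
  rw [PySem.Str.toList_join]
  have h0 : ("" : String).toList = [] := rfl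
  rw [h0]
  induction grp with
  | nil => simp [PySem.Chars.join, List.intercalate]
  | cons p l ih =>
    simp only [List.map_cons, List.map_map] at *
    rw [pvJoinEmpty]
    simp only [List.flatten_cons, ← ih]
    congr 1
    have : ((p.1 ++ " ").toList : List Char) = p.1.toList ++ [' '] := by
      rw [String.toList_append]; rfl
    simpa using this

-- an open run: the qualifying prefix, then "}", then the rest, word by word
theorem pvContGroup (rest : List (String × Bool)) :
    pvSimpleCont rest
      = ((rest.takeWhile (fun p => p.2 == true)).map (fun p => p.1.toList ++ [' '])).flatten
          ++ ['}'] ++ pvSimpleB (rest.dropWhile (fun p => p.2 == true)) := by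
  induction rest with
  | nil => simp [pvSimpleCont, pvSimpleB]
  | cons p l ih =>
    obtain ⟨w, q⟩ := p
    cases q
    · simp [pvSimpleCont, List.takeWhile, List.dropWhile, pvSimpleB]
    · simp [pvSimpleCont, List.takeWhile, List.dropWhile, ih]

-- a non-qualifying group unrolls word by word
theorem pvBGroup (rest : List (String × Bool)) :
    ((rest.takeWhile (fun p => p.2 == false)).map (fun p => p.1.toList ++ [' '])).flatten
        ++ pvSimpleB (rest.dropWhile (fun p => p.2 == false)) = pvSimpleB rest := by
  induction rest with
  | nil => simp
  | cons p l ih =>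
    obtain ⟨w, q⟩ := p
    cases q
    · simp [List.takeWhile, List.dropWhile, pvSimpleB, ← ih]
    · simp [List.takeWhile, List.dropWhile]

-- B's group loop computes the same word-by-word spec
theorem pvBuildB_eq : ∀ (n : Nat) (l : List (String × Bool)), l.length ≤ n →
    (pvBuildB l).toList = pvSimpleB l := by
  intro n
  induction n with
  | zero =>
    intro l hl
    have : l = [] := List.length_eq_zero_iff.mp (Nat.le_zero.mp hl)
    subst this
    rw [pvBuildB.eq_def]
    simp [pvSimpleB]
  | succ n ih =>
    intro l hl
    match l with
    | [] => rw [pvBuildB.eq_def]; simp [pvSimpleB]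
    | (w, q) :: rest =>
      have hrest : (rest.dropWhile (fun p => p.2 == q)).length ≤ n := by
        have := List.length_dropWhile_le (fun p : String × Bool => p.2 == q) rest
        simp only [List.length_cons] at hl
        omega
      rw [pvBuildB.eq_def]
      simp only [String.toList_append]
      rw [ih _ hrest]
      cases q
      · simp only [Bool.false_eq_true, if_false]
        rw [pvChunkToList]
        simp only [List.map_cons, List.flatten_cons, List.append_assoc]
        rw [pvBGroup rest]
        simp [pvSimpleB]
      · simp only [if_true]
        rw [String.toList_append, String.toList_append, pvChunkToList]
        simp only [List.map_cons, List.flatten_cons]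
        rw [pvSimpleB]
        simp only [if_true]
        rw [pvContGroup rest]
        have : ("}" : String).toList = ['}'] := rfl
        simp [this, List.append_assoc]

-- ===== VERDICT (by name: the statement is the Claim_ definition above) =====
theorem boldFullyCapitalisedWords_spec : Claim_equal_boldFullyCapitalisedWords := by
  unfold Claim_equal_boldFullyCapitalisedWords
  intro input _
  unfold Spec_boldFullyCapitalisedWords boldFullyCapitalisedWords boldFullyCapitalisedWords_alt
  simp only []
  congr 2
  apply String.toList_inj.mp
  rw [pvLoopA_eq, pvBuildB_eq ((((PySem.Str.split? input " ").getD []).map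
      (fun w => (w, pvFlagB w))).length) _ (le_refl _)]
  simp
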